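-- pv_equiv track=rewrite | github.com/lvreynoso/hackerrank | euler201/isum.py | eulerSum
-- ===== SOURCE A (Python) =====
-- import itertools
--
-- def eulerSum(inputSet, setLength, subsetSize):
--     setA = inputSet
--     iterator = itertools.combinations(inputSet, subsetSize)
--     sums = {}
--     for entry in iterator:
--         value = sum(entry)
--         if value in sums:
--             sums[value] += 1
--         else:
--             sums[value] = 1
--
--     uniqueSums = [n[0] for n in sums.items() if n[1] == 1]
--     result = sum(uniqueSums)
--     return result
-- ===== SOURCE B (Python) =====
-- def eulerSum(inputSet, setLength, subsetSize):
--     # DP: counts[j] maps a sum s to the number of size-j subsets of the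
--     # elements seen so far whose sum is s.
--     counts = [dict() for _ in range(subsetSize + 1)]
--     counts[0][0] = 1
--     for x in inputSet:
--         for j in range(subsetSize, 0, -1):
--             row = counts[j]
--             for s, c in counts[j - 1].items():
--                 t = s + x
--                 row[t] = row.get(t, 0) + c
--     return sum(s for s, c in counts[subsetSize].items() if c == 1)
-- ===== Notes on version B (the rewrite author's own statement) =====
-- stated objective: alternative
-- what changed: Replaces the enumeration of all C(n,k) subsets via itertools.combinations with a dynamic program that counts subsets by (size, sum) in one pass over the elements, then sums the sums whose count is exactly 1 (much faster when the distinct subset sums are few, e.g. small/clustered values, though not measurably faster on random 32-bit inputs where distinct sums proliferate).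
import Mathlib
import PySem

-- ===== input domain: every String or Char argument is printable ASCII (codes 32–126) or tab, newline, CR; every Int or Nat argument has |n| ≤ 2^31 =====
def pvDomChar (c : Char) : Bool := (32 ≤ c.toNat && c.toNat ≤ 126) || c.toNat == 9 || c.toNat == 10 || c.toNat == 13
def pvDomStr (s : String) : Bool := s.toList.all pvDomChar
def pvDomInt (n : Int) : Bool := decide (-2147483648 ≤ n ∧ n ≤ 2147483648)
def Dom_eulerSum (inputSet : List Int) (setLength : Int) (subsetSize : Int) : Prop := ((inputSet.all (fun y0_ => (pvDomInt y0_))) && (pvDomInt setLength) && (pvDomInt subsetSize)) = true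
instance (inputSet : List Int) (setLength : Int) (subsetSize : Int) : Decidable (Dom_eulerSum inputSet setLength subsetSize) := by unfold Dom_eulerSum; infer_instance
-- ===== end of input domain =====

-- B replaces A's enumeration of all C(n,k) subsets by a dynamic program counting
-- subsets by (size, sum); objective: alternative algorithm of genuinely different structure.

-- ===== PORT A =====
-- 'itertools.combinations(inputSet, subsetSize)' raises ValueError for subsetSize < 0:
-- those inputs are excluded by Pre_eulerSum below, so '.toNat' is exact on the admitted domain.
def eulerSum (inputSet : List Int) (setLength : Int) (subsetSize : Int) : Int :=
  let _setA := inputSet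
  let iterator := PySem.List.combinations inputSet subsetSize.toNat
  let sums : PySem.Dict Int Int :=
    iterator.foldl
      (fun sums entry =>
        let value := entry.sum
        if sums.contains value then sums.insert value (sums.getD value 0 + 1)
        else sums.insert value 1)
      PySem.Dict.empty
  let uniqueSums := (sums.items.filter (fun n => n.2 == 1)).map (fun n => n.1)
  uniqueSums.sum

-- ===== PORT B =====
-- inner-loop body of Source B: 'row = counts[j]; for s, c in counts[j-1].items(): row[t] = row.get(t, 0) + c'
def pvStep (x : Int) (cs : List (PySem.Dict Int Int)) (j : Int) : List (PySem.Dict Int Int) :=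
  let row := cs.getD j.toNat PySem.Dict.empty
  let row' := (cs.getD (j - 1).toNat PySem.Dict.empty).items.foldl
    (fun r sc => r.insert (sc.1 + x) (r.getD (sc.1 + x) 0 + sc.2)) row
  cs.set j.toNat row'

-- body of Source B's 'for x in inputSet' loop: 'for j in range(subsetSize, 0, -1): ...'
def pvOuter (subsetSize : Int) (cs : List (PySem.Dict Int Int)) (x : Int) : List (PySem.Dict Int Int) :=
  (PySem.List.pyRange subsetSize 0 (-1)).foldl (pvStep x) cs

def eulerSum_alt (inputSet : List Int) (setLength : Int) (subsetSize : Int) : Int :=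
  let counts0 : List (PySem.Dict Int Int) :=
    (List.replicate (subsetSize + 1).toNat PySem.Dict.empty).set 0 (PySem.Dict.empty.insert 0 1)
  let counts := inputSet.foldl (pvOuter subsetSize) counts0
  (((counts.getD subsetSize.toNat PySem.Dict.empty).items.filter (fun sc => sc.2 == 1)).map
    (fun sc => sc.1)).sum

-- ===== PRECONDITION & SPEC =====
-- Pre_ excludes only subsetSize < 0, where A raises ValueError (itertools.combinations).
def Pre_eulerSum (inputSet : List Int) (setLength : Int) (subsetSize : Int) : Prop :=
  0 ≤ subsetSize
instance (inputSet : List Int) (setLength : Int) (subsetSize : Int) : Decidable (Pre_eulerSum inputSet setLength subsetSize) := by unfold Pre_eulerSum; infer_instance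
def pvWitness_eulerSum : List Int × Int × Int := ([1, 2, 3, 4], 4, 2)

def Spec_eulerSum (inputSet : List Int) (setLength : Int) (subsetSize : Int) (out : Int) : Prop := out = eulerSum_alt inputSet setLength subsetSize
instance (inputSet : List Int) (setLength : Int) (subsetSize : Int) (out : Int) : Decidable (Spec_eulerSum inputSet setLength subsetSize out) := by unfold Spec_eulerSum; infer_instance

-- ===== CLAIM (what is proved, stated in full; the proofs are below) =====
def Claim_equal_eulerSum : Prop := ∀ (inputSet : List Int) (setLength : Int) (subsetSize : Int), Dom_eulerSum inputSet setLength subsetSize → Pre_eulerSum inputSet setLength subsetSize → Spec_eulerSum inputSet setLength subsetSize (eulerSum inputSet setLength subsetSize)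

-- ===== LEMMAS AND PROOFS =====

def pvCnt (p : List Int) (j : Nat) (v : Int) : Nat :=
  ((PySem.List.combinations p j).map List.sum).count v

def pvGoodRow (p : List Int) (j : Nat) (d : PySem.Dict Int Int) : Prop :=
  d.keys.Nodup ∧ ∀ v : Int, d.getD v 0 = (pvCnt p j v : Int)

theorem pvCnt_zero (p : List Int) (v : Int) : pvCnt p 0 v = if v = 0 then 1 else 0 := by
  by_cases h : v = 0
  · simp [pvCnt, PySem.List.combinations_zero, h]
  · have h' : (0 : Int) ≠ v := fun hh => h hh.symm
    simp [pvCnt, PySem.List.combinations_zero, h, h']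

theorem pvCount_map_add (a : Int) (l : List Int) (v : Int) :
    (l.map (fun s => a + s)).count v = l.count (v - a) := by
  have h := List.count_map_of_injective (x := v - a) l (fun s => a + s)
    (fun s t hst => by dsimp at hst; omega)
  simpa using h

theorem pvCnt_cons (a : Int) (p : List Int) (j : Nat) (v : Int) :
    pvCnt (a :: p) (j + 1) v = pvCnt p j (v - a) + pvCnt p (j + 1) v := by
  simp only [pvCnt, PySem.List.combinations_cons_succ, List.map_append, List.count_append,
    List.map_map]
  congr 1
  have h : (List.sum ∘ (fun c => a :: c)) = ((fun s => a + s) ∘ List.sum) := by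
    funext c; simp
  rw [h, ← List.map_map, pvCount_map_add]

theorem pvCnt_nil_succ (j : Nat) (v : Int) : pvCnt [] (j + 1) v = 0 := by
  simp [pvCnt, PySem.List.combinations_nil_succ]

theorem pvCnt_snoc (p : List Int) (x : Int) (j : Nat) (v : Int) :
    pvCnt (p ++ [x]) (j + 1) v = pvCnt p (j + 1) v + pvCnt p j (v - x) := by
  induction p generalizing j v with
  | nil =>
    simp only [List.nil_append, pvCnt_cons, pvCnt_nil_succ]
    cases j with
    | zero => simp [pvCnt_zero]
    | succ j' => simp [pvCnt_nil_succ]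
  | cons a p ih =>
    simp only [List.cons_append, pvCnt_cons]
    cases j with
    | zero =>
      rw [ih 0 v]
      simp only [pvCnt_zero]
      omega
    | succ j' =>
      rw [ih j' (v - a), ih (j' + 1) v, pvCnt_cons]
      have h : v - a - x = v - x - a := by ring
      rw [h]
      omega

theorem pvGetD_rowfold (x : Int) (l : List (Int × Int)) (d : PySem.Dict Int Int) (v : Int) :
    (l.foldl (fun r sc => r.insert (sc.1 + x) (r.getD (sc.1 + x) 0 + sc.2)) d).getD v 0
      = d.getD v 0 + ((l.filter (fun sc => sc.1 + x == v)).map (fun sc => sc.2)).sum := by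
  induction l generalizing d with
  | nil => simp
  | cons sc l ih =>
    simp only [List.foldl_cons, ih, List.filter_cons]
    by_cases h : sc.1 + x = v
    · simp [h]
      ring
    · have hb : (sc.1 + x == v) = false := by simp [h]
      have hne : ¬ (v = sc.1 + x) := fun hh => h hh.symm
      rw [PySem.Dict.getD_insert, if_neg hne]
      simp [hb]

theorem pvFilter_sum (x v : Int) (p : List Int) (j : Nat) (d : PySem.Dict Int Int)
    (h : pvGoodRow p j d) :
    ((d.items.filter (fun sc => sc.1 + x == v)).map (fun sc => sc.2)).sum
      = (pvCnt p j (v - x) : Int) := by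
  obtain ⟨hnd, hget⟩ := h
  rw [PySem.Dict.items_eq_map_keys d hnd 0]
  rw [List.filter_map, List.map_map]
  have hpred : ((fun sc : Int × Int => sc.1 + x == v) ∘ fun k => (k, d.getD k 0))
      = (fun k => k == v - x) := by
    funext k
    simp only [Function.comp, beq_iff_eq]
    by_cases hk : k + x = v
    · simp [hk]; omega
    · simp [hk]; omega
  rw [hpred]
  rw [List.filter_beq]
  have hcount := List.nodup_iff_count_le_one.mp hnd (v - x)
  by_cases hmem : (v - x) ∈ d.keys
  · have : d.keys.count (v - x) = 1 := by
      have := List.count_pos_iff.mpr hmem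
      omega
    simp [this, hget]
  · have : d.keys.count (v - x) = 0 := List.count_eq_zero.mpr hmem
    have hz : d.getD (v - x) 0 = 0 := by
      apply PySem.Dict.getD_of_not_contains
      rw [PySem.Dict.contains_eq_decide_mem_keys]
      simp [hmem]
    simp [this]
    rw [← hget (v - x), hz]

theorem pvGetD_set_ne (l : List (PySem.Dict Int Int)) (i j : Nat) (a : PySem.Dict Int Int) (h : i ≠ j) :
    (l.set i a).getD j PySem.Dict.empty = l.getD j PySem.Dict.empty := by
  simp [List.getD_eq_getElem?_getD, List.getElem?_set_ne h]

theorem pvGetD_set_self (l : List (PySem.Dict Int Int)) (i : Nat) (a : PySem.Dict Int Int) (h : i < l.length) :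
    (l.set i a).getD i PySem.Dict.empty = a := by
  simp [List.getD_eq_getElem?_getD, List.getElem?_set_self h]

theorem pvRange_desc_zero : PySem.List.pyRange 0 0 (-1) = [] := rfl

theorem pvRange_desc_cons (m : Nat) : PySem.List.pyRange ((m:Nat) + 1 : Int) 0 (-1) = (((m:Nat) : Int) + 1) :: PySem.List.pyRange ((m:Nat) : Int) 0 (-1) := by
  simp [pysem, List.range_succ_eq_map, List.map_map]

theorem pvStep_good (x : Int) (p : List Int) (j : Nat) (cs : List (PySem.Dict Int Int))
    (hlen : j + 1 < cs.length)
    (g1 : pvGoodRow p (j + 1) (cs.getD (j + 1) PySem.Dict.empty))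
    (g0 : pvGoodRow p j (cs.getD j PySem.Dict.empty)) :
    pvStep x cs ((j : Int) + 1) = cs.set (j + 1) ((pvStep x cs ((j : Int) + 1)).getD (j + 1) PySem.Dict.empty) ∧
    pvGoodRow (p ++ [x]) (j + 1) ((pvStep x cs ((j : Int) + 1)).getD (j + 1) PySem.Dict.empty) := by
  have ht1 : ((j : Int) + 1).toNat = j + 1 := by omega
  have ht0 : ((j : Int) + 1 - 1).toNat = j := by omega
  simp only [pvStep, ht1, ht0]
  set row' := (cs.getD j PySem.Dict.empty).items.foldl
    (fun r sc => r.insert (sc.1 + x) (r.getD (sc.1 + x) 0 + sc.2))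
    (cs.getD (j + 1) PySem.Dict.empty) with hrow
  rw [pvGetD_set_self _ _ _ hlen]
  refine ⟨rfl, ?_, ?_⟩
  · exact PySem.Dict.nodup_keys_foldl_insert_key _ _ _ _ g1.1
  · intro v
    rw [hrow, pvGetD_rowfold, pvFilter_sum x v p j _ g0, g1.2 v, pvCnt_snoc]
    push_cast
    ring

theorem pvInner (x : Int) (p : List Int) (kn : Nat) :
    ∀ m : Nat, m ≤ kn → ∀ cs : List (PySem.Dict Int Int), cs.length = kn + 1 →
    (∀ j : Nat, j ≤ m → pvGoodRow p j (cs.getD j PySem.Dict.empty)) →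
    ((PySem.List.pyRange (m : Int) 0 (-1)).foldl (pvStep x) cs).length = kn + 1 ∧
    (∀ j : Nat, j ≤ m →
      pvGoodRow (if j = 0 then p else p ++ [x]) j
        (((PySem.List.pyRange (m : Int) 0 (-1)).foldl (pvStep x) cs).getD j PySem.Dict.empty)) ∧
    (∀ j : Nat, m < j →
      ((PySem.List.pyRange (m : Int) 0 (-1)).foldl (pvStep x) cs).getD j PySem.Dict.empty
        = cs.getD j PySem.Dict.empty) := by
  intro m
  induction m with
  | zero =>
    intro _ cs hlen hgood
    simp only [Nat.cast_zero, pvRange_desc_zero, List.foldl_nil]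
    refine ⟨hlen, ?_, by simp⟩
    intro j hj
    interval_cases j
    simpa using hgood 0 (le_refl 0)
  | succ m ih =>
    intro hm cs hlen hgood
    have hcast : ((m + 1 : Nat) : Int) = ((m : Nat) : Int) + 1 := by push_cast; ring
    rw [hcast, pvRange_desc_cons, List.foldl_cons]
    have hstep := pvStep_good x p m cs (by omega)
      (hgood (m + 1) (le_refl _)) (hgood m (by omega))
    set cs₁ := pvStep x cs ((m : Int) + 1) with hcs₁
    have hset := hstep.1
    have hg1 := hstep.2
    have hlen1 : cs₁.length = kn + 1 := by rw [hset, List.length_set]; exact hlen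
    have hunch : ∀ j : Nat, j ≠ m + 1 → cs₁.getD j PySem.Dict.empty = cs.getD j PySem.Dict.empty := by
      intro j hj
      rw [hset]
      exact pvGetD_set_ne _ _ _ _ (fun hh => hj hh.symm)
    have hgood1 : ∀ j : Nat, j ≤ m → pvGoodRow p j (cs₁.getD j PySem.Dict.empty) := by
      intro j hj
      rw [hunch j (by omega)]
      exact hgood j (by omega)
    obtain ⟨hl, hgd, hun⟩ := ih (by omega) cs₁ hlen1 hgood1
    refine ⟨hl, ?_, ?_⟩
    · intro j hj
      rcases Nat.lt_or_ge j (m + 1) with hlt | hge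
      · exact hgd j (by omega)
      · have hje : j = m + 1 := by omega
        subst hje
        rw [hun (m + 1) (by omega)]
        simpa using hg1
    · intro j hj
      rw [hun j (by omega), hunch j (by omega)]

theorem pvGoodRow_snoc_zero (p : List Int) (x : Int) (d : PySem.Dict Int Int)
    (h : pvGoodRow p 0 d) : pvGoodRow (p ++ [x]) 0 d := by
  refine ⟨h.1, fun v => ?_⟩
  rw [h.2 v, pvCnt_zero, pvCnt_zero]

theorem pvOuterLoop (kn : Nat) (xs : List Int) :
    ∀ (p : List Int) (cs : List (PySem.Dict Int Int)), cs.length = kn + 1 →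
    (∀ j : Nat, j ≤ kn → pvGoodRow p j (cs.getD j PySem.Dict.empty)) →
    (xs.foldl (pvOuter (kn : Int)) cs).length = kn + 1 ∧
    ∀ j : Nat, j ≤ kn →
      pvGoodRow (p ++ xs) j ((xs.foldl (pvOuter (kn : Int)) cs).getD j PySem.Dict.empty) := by
  induction xs with
  | nil => intro p cs hlen hgood; simpa using ⟨hlen, hgood⟩
  | cons x xs ih =>
    intro p cs hlen hgood
    rw [List.foldl_cons]
    have hinner := pvInner x p kn kn (le_refl kn) cs hlen hgood
    have hgood1 : ∀ j : Nat, j ≤ kn →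
        pvGoodRow (p ++ [x]) j ((pvOuter (kn : Int) cs x).getD j PySem.Dict.empty) := by
      intro j hj
      have := hinner.2.1 j hj
      by_cases h0 : j = 0
      · subst h0
        simp only [if_pos rfl] at this
        exact pvGoodRow_snoc_zero p x _ this
      · simpa [h0, pvOuter] using this
    have := ih (p ++ [x]) (pvOuter (kn : Int) cs x) (by simpa [pvOuter] using hinner.1) hgood1
    simpa using this

theorem pvSum_filter_perm (l1 l2 : List Int) (p1 p2 : Int → Bool)
    (h1 : l1.Nodup) (h2 : l2.Nodup)
    (h : ∀ v, (v ∈ l1 ∧ p1 v = true) ↔ (v ∈ l2 ∧ p2 v = true)) :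
    (l1.filter p1).sum = (l2.filter p2).sum := by
  apply List.Perm.sum_eq
  rw [List.perm_ext_iff_of_nodup (h1.filter p1) (h2.filter p2)]
  intro v
  simp only [List.mem_filter]
  exact h v

theorem pvFoldA (l : List (List Int)) (d : PySem.Dict Int Int) :
    l.foldl (fun sums entry =>
        let value := entry.sum
        if sums.contains value then sums.insert value (sums.getD value 0 + 1)
        else sums.insert value 1) d
      = (l.map List.sum).foldl (fun d v => d.insert v (d.getD v 0 + 1)) d := by
  rw [List.foldl_map]
  apply PySem.List.foldl_congr_mem
  intro acc e _
  dsimp only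
  by_cases h : acc.contains e.sum
  · simp [h]
  · have hf : acc.contains e.sum = false := by simpa using h
    simp [hf, PySem.Dict.getD_of_not_contains (h := hf)]

theorem pvFilterMapFst (l : List Int) (f : Int → Int) :
    (((l.map (fun k => (k, f k))).filter (fun sc => sc.2 == 1)).map (fun sc => sc.1))
      = l.filter (fun k => f k == 1) := by
  simp [List.filter_map, List.map_map, Function.comp_def]

theorem eulerSum_eq_filter (inputSet : List Int) (setLength subsetSize : Int) :
    eulerSum inputSet setLength subsetSize
      = ((PySem.Set.ofList ((PySem.List.combinations inputSet subsetSize.toNat).map List.sum)).filter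
          (fun k => (((PySem.List.combinations inputSet subsetSize.toNat).map List.sum).count k : Int) == 1)).sum := by
  show ((((PySem.List.combinations inputSet subsetSize.toNat).foldl _ PySem.Dict.empty).items.filter
      (fun n => n.2 == 1)).map (fun n => n.1)).sum = _
  rw [pvFoldA, PySem.Dict.foldl_insert_getD_add_one_eq_counter, PySem.Dict.items_counter]
  rw [pvFilterMapFst]

theorem pvCounts0_good (kn : Nat) :
    ((List.replicate (kn + 1) PySem.Dict.empty).set 0
      ((PySem.Dict.empty : PySem.Dict Int Int).insert 0 1)).length = kn + 1 ∧
    ∀ j : Nat, j ≤ kn → pvGoodRow [] j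
      (((List.replicate (kn + 1) PySem.Dict.empty).set 0
        ((PySem.Dict.empty : PySem.Dict Int Int).insert 0 1)).getD j PySem.Dict.empty) := by
  refine ⟨by simp, ?_⟩
  intro j hj
  cases j with
  | zero =>
    rw [pvGetD_set_self _ _ _ (by simp)]
    refine ⟨by decide, fun v => ?_⟩
    rw [PySem.Dict.getD_insert, pvCnt_zero]
    by_cases h : v = 0 <;> simp [h]
  | succ j' =>
    rw [pvGetD_set_ne _ _ _ _ (by omega)]
    have hrep : (List.replicate (kn + 1) (PySem.Dict.empty : PySem.Dict Int Int)).getD (j' + 1)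
        PySem.Dict.empty = PySem.Dict.empty := by
      simp [List.getD_eq_getElem?_getD]
    rw [hrep]
    refine ⟨by decide, fun v => ?_⟩
    rw [pvCnt_nil_succ]
    simp

theorem eulerSum_spec' (inputSet : List Int) (setLength subsetSize : Int)
    (hpre : 0 ≤ subsetSize) :
    eulerSum inputSet setLength subsetSize = eulerSum_alt inputSet setLength subsetSize := by
  have hk : ((subsetSize.toNat : Nat) : Int) = subsetSize := Int.toNat_of_nonneg hpre
  obtain ⟨hl0, hg0⟩ := pvCounts0_good subsetSize.toNat
  have houter := pvOuterLoop subsetSize.toNat inputSet [] _ hl0 hg0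
  have hrow := houter.2 subsetSize.toNat (le_refl _)
  simp only [List.nil_append] at hrow
  set d := (inputSet.foldl (pvOuter ((subsetSize.toNat : Nat) : Int))
      ((List.replicate (subsetSize.toNat + 1) PySem.Dict.empty).set 0
        (PySem.Dict.empty.insert 0 1))).getD subsetSize.toNat PySem.Dict.empty with hd
  have halt : eulerSum_alt inputSet setLength subsetSize
      = (d.keys.filter (fun k => d.getD k 0 == 1)).sum := by
    unfold eulerSum_alt
    dsimp only
    have hkt : (subsetSize + 1).toNat = subsetSize.toNat + 1 := by omega
    rw [hkt, ← hk]
    simp only [Int.toNat_natCast]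
    rw [PySem.Dict.items_eq_map_keys _ hrow.1 0, pvFilterMapFst]
  rw [halt, eulerSum_eq_filter]
  apply pvSum_filter_perm
  · exact PySem.Set.nodup_ofList _
  · exact hrow.1
  · intro v
    have hcnt : ((PySem.List.combinations inputSet subsetSize.toNat).map List.sum).count v
        = pvCnt inputSet subsetSize.toNat v := rfl
    have hget := hrow.2 v
    constructor
    · rintro ⟨hm, hp⟩
      simp only [beq_iff_eq] at hp
      have h1 : pvCnt inputSet subsetSize.toNat v = 1 := by
        rw [← hcnt]; exact_mod_cast hp
      have hgv : d.getD v 0 = 1 := by rw [hget, h1]; norm_num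
      refine ⟨?_, by simp [hgv]⟩
      by_contra hnm
      have hcf : d.contains v = false := by
        rw [PySem.Dict.contains_eq_decide_mem_keys]; simp [hnm]
      rw [PySem.Dict.getD_of_not_contains (h := hcf)] at hgv
      norm_num at hgv
    · rintro ⟨hm, hp⟩
      simp only [beq_iff_eq] at hp
      have h1 : pvCnt inputSet subsetSize.toNat v = 1 := by
        rw [hp] at hget; exact_mod_cast hget.symm
      constructor
      · rw [PySem.Set.mem_ofList]
        have hpos : 0 < ((PySem.List.combinations inputSet subsetSize.toNat).map List.sum).count v := by
          rw [hcnt]; omega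
        exact List.count_pos_iff.mp hpos
      · simp only [beq_iff_eq]
        rw [hcnt, h1]; norm_num

-- ===== VERDICT (by name: the statement is the Claim_ definition above) =====
theorem eulerSum_spec : Claim_equal_eulerSum := by
  unfold Claim_equal_eulerSum Spec_eulerSum Pre_eulerSum
  intro inputSet setLength subsetSize _ hpre
  exact eulerSum_spec' inputSet setLength subsetSize hpre
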